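-- pv_equiv track=rewrite | github.com/beiko-lab/sarand_fullVersion | code/extract_neighborhood.py | remove_identical_sub_sequences
-- ===== SOURCE A (Python) =====
-- def remove_identical_sub_sequences(sequence_list, path_list):
-- 	"""
-- 	To keep only one instance in case of multiple identical extracted sequences or
-- 	when a sequence is a subsequence of another one
-- 	Parameters:
-- 		sequence_list:	list of extracted sequences
-- 		path_list:		list of extracted paths
-- 	Return sequence_list and path_list in which every sequence/path is unique and
-- 		none of them is subssequence/subpath of another one
-- 	"""
-- 	#In case two sequences are identical keep the one with the lower index in the list
-- 	identical_sub_set = set()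
-- 	for i, seq1 in enumerate(sequence_list):
-- 		for j, seq2 in enumerate(sequence_list):
-- 			if i < j:
-- 				if seq1==seq2 or seq2 in seq1:
-- 					identical_sub_set.add(j)
-- 				elif seq1 in seq2:
-- 					identical_sub_set.add(i)
--
-- 	identical_sub_list = sorted(identical_sub_set)
-- 	for index in reversed(identical_sub_list):
-- 		del sequence_list[index]
-- 		del path_list[index]
--
-- 	return sequence_list, path_list
-- ===== SOURCE B (Python) =====
-- def remove_identical_sub_sequences(sequence_list, path_list):
-- 	"""
-- 	Keep only the sequences that are not duplicates or substrings of others.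
-- 	Dedup first (dict.fromkeys keeps first occurrences), then scan the distinct
-- 	sequences in order of decreasing length, maintaining a list of survivors:
-- 	a sequence is dropped exactly when it is contained in a survivor, which by
-- 	the length order is a maximal sequence.  The removed positions are then
-- 	deleted from both parallel lists.
-- 	"""
-- 	distinct = list(dict.fromkeys(sequence_list))
-- 	survivors = []
-- 	for s in sorted(distinct, key=len, reverse=True):
-- 		if not any(s in t for t in survivors):
-- 			survivors.append(s)
-- 	kept = {sequence_list.index(s) for s in survivors}
-- 	removed = set(range(len(sequence_list))) - kept
-- 	sequence_list[:] = [s for i, s in enumerate(sequence_list) if i not in removed]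
-- 	path_list[:] = [p for i, p in enumerate(path_list) if i not in removed]
-- 	return sequence_list, path_list
-- ===== Notes on version B (the rewrite author's own statement) =====
-- stated objective: faster
-- what changed: B replaces A's all-pairs comparison with removal-set collection and back-to-front deletion by a dedup (dict.fromkeys), a scan of the distinct sequences in decreasing-length order that keeps a survivor list of maximal sequences (each sequence compared only against the usually-few survivors instead of all n sequences), and a symmetric deletion of the removed positions from both lists; Pre_ excludes exactly the inputs where A raises IndexError (a deleted index with no path_list entry).
import Mathlib
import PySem

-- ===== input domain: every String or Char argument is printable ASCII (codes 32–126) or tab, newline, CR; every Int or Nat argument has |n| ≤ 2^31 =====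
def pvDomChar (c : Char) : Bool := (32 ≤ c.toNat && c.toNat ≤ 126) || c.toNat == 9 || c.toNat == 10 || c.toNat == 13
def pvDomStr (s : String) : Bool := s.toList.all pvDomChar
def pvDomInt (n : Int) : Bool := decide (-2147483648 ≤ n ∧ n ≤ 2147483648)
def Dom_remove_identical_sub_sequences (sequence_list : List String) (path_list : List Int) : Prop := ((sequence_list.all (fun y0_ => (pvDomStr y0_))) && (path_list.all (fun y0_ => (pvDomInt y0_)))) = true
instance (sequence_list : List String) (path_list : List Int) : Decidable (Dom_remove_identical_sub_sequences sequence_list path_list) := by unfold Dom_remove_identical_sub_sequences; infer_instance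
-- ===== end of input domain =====

-- B drops A's all-pairs removal-set + back-to-front deletion for: dedup, a
-- decreasing-length scan keeping a survivor list of maximal sequences, and a
-- symmetric deletion of the removed positions (objective: faster — each sequence
-- is compared only against the current survivors; measured faster by the check).
-- A mutates its arguments in place and returns them; the equivalence proved here
-- is about the RETURN value (B performs the same slice-assignment mutation in Source B).

-- ===== PORT A =====
-- the nested 'for i, seq1 … for j, seq2 …' loops building identical_sub_set
def pvAIss (sequence_list : List String) : PySem.Set Int :=
  (PySem.List.enumerate sequence_list).foldl (fun S p =>
    (PySem.List.enumerate sequence_list).foldl (fun S q =>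
      if p.1 < q.1 then
        if p.2 == q.2 || PySem.Str.isIn q.2 p.2 then PySem.Set.add S q.1
        else if PySem.Str.isIn p.2 q.2 then PySem.Set.add S p.1
        else S
      else S) S) PySem.Set.empty

-- the 'for index in reversed(identical_sub_list): del …' loop; none = IndexError
def pvADel (isl : List Int) (sequence_list : List String) (path_list : List Int) :
    Option (List String × List Int) :=
  isl.reverse.foldl (fun st idx => st.bind (fun sp =>
    match PySem.List.pop? sp.1 idx, PySem.List.pop? sp.2 idx with
    | some a, some b => some (a.2, b.2)
    | _, _ => none)) (some (sequence_list, path_list))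

def remove_identical_sub_sequences (sequence_list : List String) (path_list : List Int) :
    List String × List Int :=
  (pvADel (PySem.List.sorted (pvAIss sequence_list) (fun x => x)) sequence_list path_list).getD
    (sequence_list, path_list)

-- ===== PORT B =====
-- Source B's survivor loop body: 'if not any(s in t for t in survivors): survivors.append(s)'
def pvSurvStep (survivors : List String) (s : String) : List String :=
  if survivors.any (fun t => PySem.Str.isIn s t) then survivors else survivors ++ [s]

-- 'for s in sorted(distinct, key=len, reverse=True): …' over distinct = list(dict.fromkeys(sequence_list))
def pvSurvivors (sequence_list : List String) : List String :=
  (PySem.List.sorted (PySem.List.dedup sequence_list) (fun s => PySem.Str.len s) true).foldl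
    pvSurvStep []

-- 'sequence_list.index(s)' (always found here; .index raises only on a missing value)
def pvFirstIdx (sequence_list : List String) (s : String) : Int :=
  (((PySem.List.index? sequence_list s).getD 0 : Nat) : Int)

-- 'removed = set(range(len(sequence_list))) - kept'
def pvRemoved (sequence_list : List String) : PySem.Set Int :=
  PySem.Set.diff (PySem.Set.ofList (PySem.List.pyRange 0 (PySem.List.len sequence_list)))
    (PySem.Set.ofList ((pvSurvivors sequence_list).map (pvFirstIdx sequence_list)))

def remove_identical_sub_sequences_alt (sequence_list : List String) (path_list : List Int) :
    List String × List Int :=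
  let removed := pvRemoved sequence_list
  (((PySem.List.enumerate sequence_list).filter
      (fun p => !(PySem.Set.contains removed p.1))).map (·.2),
   ((PySem.List.enumerate path_list).filter
      (fun p => !(PySem.Set.contains removed p.1))).map (·.2))

-- ===== PRECONDITION & SPEC =====
-- index k is deleted by A iff sequence k is a duplicate/substring of another sequence
def pvRemB (seqs : List String) (k : Nat) : Bool :=
  (List.range seqs.length).any (fun l =>
    l != k && PySem.Str.isIn (seqs.getD k "") (seqs.getD l "") &&
    (decide (l < k) || seqs.getD l "" != seqs.getD k ""))

-- Pre_ excludes exactly the inputs where A raises IndexError: some deleted index k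
-- has no k-th entry in path_list (del path_list[k] fails); A returns everywhere else.
def Pre_remove_identical_sub_sequences (sequence_list : List String) (path_list : List Int) : Prop :=
  ∀ k, k < sequence_list.length → pvRemB sequence_list k = true → k < path_list.length
instance (sequence_list : List String) (path_list : List Int) :
    Decidable (Pre_remove_identical_sub_sequences sequence_list path_list) := by
  unfold Pre_remove_identical_sub_sequences; infer_instance

def pvWitness_remove_identical_sub_sequences : List String × List Int :=
  (["ab", "a", "cd", "cd"], [1, 2, 3, 4])

def Spec_remove_identical_sub_sequences (sequence_list : List String) (path_list : List Int) (out : List String × List Int) : Prop := out = remove_identical_sub_sequences_alt sequence_list path_list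
instance (sequence_list : List String) (path_list : List Int) (out : List String × List Int) : Decidable (Spec_remove_identical_sub_sequences sequence_list path_list out) := by unfold Spec_remove_identical_sub_sequences; infer_instance

-- ===== CLAIM (what is proved, stated in full; the proofs are below) =====
def Claim_equal_remove_identical_sub_sequences : Prop := ∀ (sequence_list : List String) (path_list : List Int), Dom_remove_identical_sub_sequences sequence_list path_list → Pre_remove_identical_sub_sequences sequence_list path_list → Spec_remove_identical_sub_sequences sequence_list path_list (remove_identical_sub_sequences sequence_list path_list)


-- ===== LEMMAS AND PROOFS =====

-- index-filter: keep exactly the positions whose index satisfies P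
def idxFilter {α : Type} : List α → (Nat → Bool) → List α
  | [], _ => []
  | x :: xs, P =>
    if P 0 then x :: idxFilter xs (fun k => P (k + 1)) else idxFilter xs (fun k => P (k + 1))

theorem idxFilter_congr {α : Type} : ∀ (xs : List α) (P Q : Nat → Bool),
    (∀ k, k < xs.length → P k = Q k) → idxFilter xs P = idxFilter xs Q := by
  intro xs
  induction xs with
  | nil => intro _ _ _; rfl
  | cons x xs ih =>
    intro P Q h
    simp only [idxFilter, h 0 (by simp),
      ih (fun k => P (k + 1)) (fun k => Q (k + 1)) (fun k hk => h (k + 1) (by simpa using hk))]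

theorem idxFilter_eq_self {α : Type} : ∀ (xs : List α) (P : Nat → Bool),
    (∀ k, k < xs.length → P k = true) → idxFilter xs P = xs := by
  intro xs
  induction xs with
  | nil => intro _ _; rfl
  | cons x xs ih =>
    intro P h
    simp only [idxFilter, h 0 (by simp), if_true,
      ih (fun k => P (k + 1)) (fun k hk => h (k + 1) (by simpa using hk))]

theorem idxFilter_append {α : Type} : ∀ (ys zs : List α) (P : Nat → Bool),
    idxFilter (ys ++ zs) P = idxFilter ys P ++ idxFilter zs (fun k => P (k + ys.length)) := by
  intro ys
  induction ys with
  | nil =>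
    intro zs P
    rw [List.nil_append]
    have h0 : (fun k => P (k + ([] : List α).length)) = P := by funext k; simp
    rw [h0]
    rfl
  | cons y ys ih =>
    intro zs P
    simp only [List.cons_append, idxFilter, ih zs (fun k => P (k + 1)), List.length_cons]
    have h2 : (idxFilter zs fun k => P (k + ys.length + 1)) =
        idxFilter zs fun k => P (k + (ys.length + 1)) :=
      idxFilter_congr _ _ _ (by intro k _; congr 1)
    split <;> simp [h2]

-- fold deleting ascending indices back-to-front
def eraseFold {α : Type} (xs : List α) (D : List Nat) : List α :=
  D.foldr (fun d l => l.eraseIdx d) xs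

theorem eraseFold_nil {α : Type} (xs : List α) : eraseFold xs [] = xs := rfl

theorem eraseFold_cons {α : Type} (xs : List α) (d : Nat) (D : List Nat) :
    eraseFold xs (d :: D) = (eraseFold xs D).eraseIdx d := rfl

theorem chain_length_le : ∀ (D : List Nat), D.Pairwise (· < ·) →
    ∀ a b : Nat, (∀ x ∈ D, a < x ∧ x < b) → D.length ≤ b - a - 1 := by
  intro D
  induction D with
  | nil => intro _ a b _; simp
  | cons d D ih =>
    intro hp a b h
    have hd := h d (by simp)
    have ht : ∀ x ∈ D, d < x ∧ x < b := fun x hx =>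
      ⟨(List.pairwise_cons.mp hp).1 x hx, (h x (by simp [hx])).2⟩
    have := ih (List.pairwise_cons.mp hp).2 d b ht
    simp only [List.length_cons]
    omega

theorem length_eraseFold {α : Type} : ∀ (D : List Nat) (xs : List α), D.Pairwise (· < ·) →
    (∀ d ∈ D, d < xs.length) → (eraseFold xs D).length = xs.length - D.length := by
  intro D
  induction D with
  | nil => intro xs _ _; simp [eraseFold_nil]
  | cons d D ih =>
    intro xs hp h
    have hlen := ih xs (List.pairwise_cons.mp hp).2 (fun x hx => h x (by simp [hx]))
    have hcl : D.length ≤ xs.length - d - 1 :=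
      chain_length_le D (List.pairwise_cons.mp hp).2 d xs.length
        (fun x hx => ⟨(List.pairwise_cons.mp hp).1 x hx, h x (by simp [hx])⟩)
    have hd : d < xs.length := h d (by simp)
    have hd' : d < (eraseFold xs D).length := by omega
    rw [eraseFold_cons, List.length_eraseIdx_of_lt hd', hlen, List.length_cons]
    omega

theorem eraseFold_eq_idxFilter {α : Type} : ∀ (D : List Nat) (xs : List α),
    D.Pairwise (· < ·) → (∀ d ∈ D, d < xs.length) →
    eraseFold xs D = idxFilter xs (fun k => decide (k ∉ D)) := by
  intro D
  induction D with
  | nil => intro xs _ _; rw [eraseFold_nil, idxFilter_eq_self]; intro k _; simp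
  | cons d D ih =>
    intro xs hp h
    have hdl : ∀ x ∈ D, d < x := (List.pairwise_cons.mp hp).1
    have hdD : d ∉ D := fun hc => absurd (hdl d hc) (lt_irrefl d)
    have hd : d < xs.length := h d (by simp)
    have hlt : (xs.take d).length = d := by simp [List.length_take, Nat.min_eq_left hd.le]
    have hsplit : xs = xs.take d ++ xs[d] :: xs.drop (d + 1) := by
      conv_lhs => rw [← List.take_append_drop (d + 1) xs]
      rw [List.take_add_one, List.getElem?_eq_getElem hd]
      simp
    have hfull : ∀ (P : Nat → Bool), idxFilter xs P =
        idxFilter (xs.take d) P ++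
          idxFilter (xs[d] :: xs.drop (d + 1)) (fun k => P (k + d)) := by
      intro P
      conv_lhs => rw [hsplit]
      rw [idxFilter_append, hlt]
    rw [eraseFold_cons, ih xs (List.pairwise_cons.mp hp).2 (fun x hx => h x (by simp [hx]))]
    rw [hfull, hfull]
    have hpre : idxFilter (xs.take d) (fun k => decide (k ∉ D)) = xs.take d := by
      apply idxFilter_eq_self
      intro k hk
      rw [hlt] at hk
      simp only [decide_eq_true_eq]
      exact fun hkD => absurd (hdl k hkD) (by omega)
    have hpre' : idxFilter (xs.take d) (fun k => decide (k ∉ d :: D)) = xs.take d := by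
      apply idxFilter_eq_self
      intro k hk
      rw [hlt] at hk
      simp only [List.mem_cons, decide_eq_true_eq]
      rintro (rfl | hkD)
      · omega
      · exact absurd (hdl k hkD) (by omega)
    rw [hpre, hpre']
    simp only [idxFilter, Nat.zero_add]
    rw [if_pos (by simp [hdD]), if_neg (by simp)]
    rw [List.eraseIdx_append_of_length_le (by omega)]
    rw [hlt, Nat.sub_self, List.eraseIdx_cons_zero]
    congr 1
    apply idxFilter_congr
    intro k _
    simp [List.mem_cons]

-- A's deletion loop succeeds and equals eraseFold on both components
theorem pvADel_eq : ∀ (D : List Nat) (xs : List String) (ys : List Int),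
    D.Pairwise (· < ·) → (∀ d ∈ D, d < xs.length ∧ d < ys.length) →
    pvADel (D.map (fun k : Nat => (k : Int))) xs ys = some (eraseFold xs D, eraseFold ys D) := by
  intro D
  induction D with
  | nil => intro xs ys _ _; simp [pvADel, eraseFold_nil]
  | cons d D ih =>
    intro xs ys hp h
    have hp' := (List.pairwise_cons.mp hp).2
    have hdl := (List.pairwise_cons.mp hp).1
    have hstep : pvADel ((d :: D).map (fun k : Nat => (k : Int))) xs ys =
        (pvADel (D.map (fun k : Nat => (k : Int))) xs ys).bind (fun sp =>
          match PySem.List.pop? sp.1 (d : Int), PySem.List.pop? sp.2 (d : Int) with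
          | some a, some b => some (a.2, b.2)
          | _, _ => none) := by
      unfold pvADel
      rw [List.map_cons, List.reverse_cons, List.foldl_append, List.foldl_cons, List.foldl_nil]
    rw [hstep, ih xs ys hp' (fun x hx => h x (by simp [hx]))]
    have hx1 : d < (eraseFold xs D).length := by
      rw [length_eraseFold D xs hp' (fun x hx => (h x (by simp [hx])).1)]
      have := chain_length_le D hp' d xs.length
        (fun x hx => ⟨hdl x hx, (h x (by simp [hx])).1⟩)
      have := (h d (by simp)).1
      omega
    have hy1 : d < (eraseFold ys D).length := by
      rw [length_eraseFold D ys hp' (fun x hx => (h x (by simp [hx])).2)]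
      have := chain_length_le D hp' d ys.length
        (fun x hx => ⟨hdl x hx, (h x (by simp [hx])).2⟩)
      have := (h d (by simp)).2
      omega
    rw [Option.bind_some]
    rw [PySem.List.pop?_natCast _ _ hx1, PySem.List.pop?_natCast _ _ hy1]
    rw [eraseFold_cons, eraseFold_cons]

-- generic membership / nodup through a conditional-add foldl
theorem mem_step_fold {α : Type} (f : List Int → α → List Int) (P : α → Int → Prop)
    (hf : ∀ S x m, m ∈ f S x ↔ m ∈ S ∨ P x m) :
    ∀ (L : List α) (S : List Int) (m : Int), m ∈ L.foldl f S ↔ m ∈ S ∨ ∃ x ∈ L, P x m := by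
  intro L
  induction L with
  | nil => intro S m; simp
  | cons a L ih =>
    intro S m
    rw [List.foldl_cons, ih]
    simp only [List.mem_cons, hf]
    constructor
    · rintro (((hS | hP) | ⟨x, hx, hPx⟩))
      · exact Or.inl hS
      · exact Or.inr ⟨a, Or.inl rfl, hP⟩
      · exact Or.inr ⟨x, Or.inr hx, hPx⟩
    · rintro (hS | ⟨x, (rfl | hx), hPx⟩)
      · exact Or.inl (Or.inl hS)
      · exact Or.inl (Or.inr hPx)
      · exact Or.inr ⟨x, hx, hPx⟩

theorem nodup_step_fold {α : Type} (f : List Int → α → List Int)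
    (hf : ∀ S x, S.Nodup → (f S x).Nodup) :
    ∀ (L : List α) (S : List Int), S.Nodup → (L.foldl f S).Nodup := by
  intro L
  induction L with
  | nil => intro S h; simpa
  | cons a L ih => intro S h; rw [List.foldl_cons]; exact ih _ (hf S a h)

-- the per-pair condition of A's nested loop
def pvPairP (p q : Int × String) (m : Int) : Prop :=
  p.1 < q.1 ∧ ((q.2.toList <:+: p.2.toList ∧ m = q.1) ∨
    (¬ q.2.toList <:+: p.2.toList ∧ p.2.toList <:+: q.2.toList ∧ m = p.1))

theorem pvAIss_mem (seqs : List String) (m : Int) :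
    m ∈ pvAIss seqs ↔
      ∃ p ∈ PySem.List.enumerate seqs, ∃ q ∈ PySem.List.enumerate seqs, pvPairP p q m := by
  have hinner : ∀ (p : Int × String) (S : List Int) (m : Int),
      m ∈ (PySem.List.enumerate seqs).foldl (fun S q =>
        if p.1 < q.1 then
          if p.2 == q.2 || PySem.Str.isIn q.2 p.2 then PySem.Set.add S q.1
          else if PySem.Str.isIn p.2 q.2 then PySem.Set.add S p.1
          else S
        else S) S ↔ m ∈ S ∨ ∃ q ∈ PySem.List.enumerate seqs, pvPairP p q m := by
    intro p
    apply mem_step_fold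
    intro S q m
    have hc1 : (p.2 == q.2 || PySem.Str.isIn q.2 p.2) = true ↔ q.2.toList <:+: p.2.toList := by
      simp only [Bool.or_eq_true, beq_iff_eq, PySem.Str.isIn_iff_infix]
      constructor
      · rintro (heq | h)
        · rw [heq]
        · exact h
      · exact fun h => Or.inr h
    unfold pvPairP
    split_ifs with h1 h2 h3
    · rw [PySem.Set.mem_add]
      rw [hc1] at h2
      constructor
      · rintro (hS | rfl)
        · exact Or.inl hS
        · exact Or.inr ⟨h1, Or.inl ⟨h2, rfl⟩⟩
      · rintro (hS | ⟨_, (⟨_, rfl⟩ | ⟨hni, _, rfl⟩)⟩)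
        · exact Or.inl hS
        · exact Or.inr rfl
        · exact absurd h2 hni
    · rw [PySem.Set.mem_add]
      rw [hc1] at h2
      rw [PySem.Str.isIn_iff_infix] at h3
      constructor
      · rintro (hS | rfl)
        · exact Or.inl hS
        · exact Or.inr ⟨h1, Or.inr ⟨h2, h3, rfl⟩⟩
      · rintro (hS | ⟨_, (⟨hi, rfl⟩ | ⟨_, _, rfl⟩)⟩)
        · exact Or.inl hS
        · exact absurd hi h2
        · exact Or.inr rfl
    · rw [hc1] at h2
      rw [PySem.Str.isIn_iff_infix] at h3
      constructor
      · exact Or.inl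
      · rintro (hS | ⟨_, (⟨hi, rfl⟩ | ⟨_, hi, rfl⟩)⟩)
        · exact hS
        · exact absurd hi h2
        · exact absurd hi h3
    · constructor
      · exact Or.inl
      · rintro (hS | ⟨hlt, _⟩)
        · exact hS
        · exact absurd hlt h1
  unfold pvAIss
  rw [mem_step_fold _ (fun p m => ∃ q ∈ PySem.List.enumerate seqs, pvPairP p q m)
    (fun S p m => hinner p S m)]
  simp [PySem.Set.empty]

theorem pvAIss_nodup (seqs : List String) : (pvAIss seqs).Nodup := by
  unfold pvAIss
  apply nodup_step_fold
  · intro S x h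
    apply nodup_step_fold
    · intro S' y h'
      split_ifs <;> first | exact PySem.Set.nodup_add _ _ h' | exact h'
    · exact h
  · simp [PySem.Set.empty]

-- mutual substring ⇒ equal strings
theorem infix_antisymm (a b : String) (h1 : a.toList <:+: b.toList) (h2 : b.toList <:+: a.toList) :
    a = b :=
  String.toList_inj.mp (h1.sublist.eq_of_length_le h2.sublist.length_le)

theorem pvRemB_iff (seqs : List String) (k : Nat) :
    pvRemB seqs k = true ↔ ∃ l, l < seqs.length ∧ l ≠ k ∧
      (seqs.getD k "").toList <:+: (seqs.getD l "").toList ∧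
      (l < k ∨ seqs.getD l "" ≠ seqs.getD k "") := by
  unfold pvRemB
  rw [List.any_eq_true]
  constructor
  · rintro ⟨l, hl, hcond⟩
    rw [List.mem_range] at hl
    simp only [Bool.and_eq_true, bne_iff_ne, ne_eq, Bool.or_eq_true, decide_eq_true_eq,
      PySem.Str.isIn_iff_infix] at hcond
    exact ⟨l, hl, hcond.1.1, hcond.1.2, hcond.2⟩
  · rintro ⟨l, hl, hne, hin, hor⟩
    refine ⟨l, List.mem_range.mpr hl, ?_⟩
    simp only [Bool.and_eq_true, bne_iff_ne, ne_eq, Bool.or_eq_true, decide_eq_true_eq,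
      PySem.Str.isIn_iff_infix]
    exact ⟨⟨hne, hin⟩, hor⟩

-- the removed-index list, in ascending order
def pvDn (seqs : List String) : List Nat :=
  (List.range seqs.length).filter (fun k => pvRemB seqs k)

theorem mem_pvDn (seqs : List String) (k : Nat) :
    k ∈ pvDn seqs ↔ k < seqs.length ∧ pvRemB seqs k = true := by
  simp [pvDn, List.mem_filter, List.mem_range]

theorem pvDn_pairwise (seqs : List String) : (pvDn seqs).Pairwise (· < ·) :=
  List.Pairwise.filter _ (List.pairwise_lt_range)

-- the sorted removal set is exactly pvDn (as Ints)
theorem sorted_pvAIss (seqs : List String) :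
    PySem.List.sorted (pvAIss seqs) (fun x => x) = (pvDn seqs).map (fun k : Nat => (k : Int)) := by
  apply PySem.List.sorted_eq_of_perm_of_pairwise_lt
  · have hDL : ((pvDn seqs).map (fun k : Nat => (k : Int))).Nodup :=
      ((List.nodup_range (n := seqs.length)).filter _).map Nat.cast_injective
    rw [List.perm_ext_iff_of_nodup hDL (pvAIss_nodup seqs)]
    intro m
    rw [pvAIss_mem]
    constructor
    · simp only [List.mem_map]
      rintro ⟨k, hk, rfl⟩
      rw [mem_pvDn] at hk
      obtain ⟨hkn, hrem⟩ := hk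
      obtain ⟨l, hl, hne, hin, hor⟩ := (pvRemB_iff seqs k).mp hrem
      have hgk : seqs.getD k "" = seqs[k] := List.getD_eq_getElem seqs "" hkn
      have hgl : seqs.getD l "" = seqs[l] := List.getD_eq_getElem seqs "" hl
      rw [hgk, hgl] at hin hor
      rcases Nat.lt_or_ge l k with hlk | hlk
      · refine ⟨((l : Int), seqs[l]), ?_, ((k : Int), seqs[k]), ?_, ?_⟩
        · rw [PySem.List.mem_enumerate_iff]; exact ⟨l, hl, by simp⟩
        · rw [PySem.List.mem_enumerate_iff]; exact ⟨k, hkn, by simp⟩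
        · refine ⟨?_, Or.inl ⟨hin, rfl⟩⟩
          show (l : Int) < (k : Int)
          exact_mod_cast hlk
      · have hkl : k < l := by omega
        have hnel : seqs[l] ≠ seqs[k] := by
          rcases hor with h | h
          · omega
          · exact h
        refine ⟨((k : Int), seqs[k]), ?_, ((l : Int), seqs[l]), ?_, ?_⟩
        · rw [PySem.List.mem_enumerate_iff]; exact ⟨k, hkn, by simp⟩
        · rw [PySem.List.mem_enumerate_iff]; exact ⟨l, hl, by simp⟩
        · refine ⟨?_, Or.inr ⟨?_, hin, rfl⟩⟩
          · show (k : Int) < (l : Int)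
            exact_mod_cast hkl
          · intro hc
            exact hnel (infix_antisymm _ _ hc hin)
    · rintro ⟨p, hp, q, hq, hpq⟩
      rw [PySem.List.mem_enumerate_iff] at hp hq
      obtain ⟨i, hi, rfl⟩ := hp
      obtain ⟨j, hj, rfl⟩ := hq
      obtain ⟨hij, hcase⟩ := hpq
      simp only [Int.zero_add] at hij ⊢
      have hij' : i < j := by exact_mod_cast hij
      have hgi : seqs.getD i "" = seqs[i] := List.getD_eq_getElem seqs "" hi
      have hgj : seqs.getD j "" = seqs[j] := List.getD_eq_getElem seqs "" hj
      rcases hcase with ⟨hin, rfl⟩ | ⟨hnin, hin, rfl⟩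
      · simp only [List.mem_map]
        refine ⟨j, ?_, by simp⟩
        rw [mem_pvDn]
        exact ⟨hj, (pvRemB_iff seqs j).mpr ⟨i, hi, by omega, by rw [hgi, hgj]; exact hin,
          Or.inl hij'⟩⟩
      · simp only [List.mem_map]
        refine ⟨i, ?_, by simp⟩
        rw [mem_pvDn]
        refine ⟨hi, (pvRemB_iff seqs i).mpr ⟨j, hj, by omega, by rw [hgi, hgj]; exact hin,
          Or.inr ?_⟩⟩
        rw [hgi, hgj]
        intro heq
        exact hnin (by rw [heq])
  · refine List.Pairwise.map _ ?_ (pvDn_pairwise seqs)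
    intro a b h
    exact_mod_cast h

-- ===== B-side lemmas =====

-- s is a maximal sequence: no other sequence of the list properly contains it
def pvMax (seqs : List String) (s : String) : Prop :=
  ∀ t ∈ seqs, s.toList <:+: t.toList → t = s

-- infix and not longer ⇒ equal
theorem infix_eq_of_le_length (a b : String) (h : a.toList <:+: b.toList)
    (hl : b.toList.length ≤ a.toList.length) : b = a :=
  String.toList_inj.mp (h.sublist.eq_of_length_le hl).symm

-- every sequence has a maximal container (a container of greatest length)
theorem exists_max_container (seqs : List String) (s : String) (hs : s ∈ seqs) :
    ∃ u ∈ seqs, pvMax seqs u ∧ s.toList <:+: u.toList := by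
  have hsC : s ∈ seqs.filter (fun t => PySem.Str.isIn s t) := by
    rw [List.mem_filter]
    exact ⟨hs, (PySem.Str.isIn_iff_infix _ _).mpr (List.infix_refl _)⟩
  cases hA : List.argmax (fun t => t.toList.length) (seqs.filter (fun t => PySem.Str.isIn s t)) with
  | none =>
    exact absurd (List.argmax_eq_none.mp hA) (List.ne_nil_of_mem hsC)
  | some u =>
    have huA : u ∈ List.argmax (fun t => t.toList.length)
        (seqs.filter (fun t => PySem.Str.isIn s t)) := by rw [hA]; rfl
    have huC := List.argmax_mem huA
    rw [List.mem_filter, PySem.Str.isIn_iff_infix] at huC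
    refine ⟨u, huC.1, ?_, huC.2⟩
    intro t ht hinf
    have htC : t ∈ seqs.filter (fun t => PySem.Str.isIn s t) := by
      rw [List.mem_filter, PySem.Str.isIn_iff_infix]
      exact ⟨ht, huC.2.trans hinf⟩
    exact infix_eq_of_le_length u t hinf (List.le_of_mem_argmax (f := fun t => t.toList.length) htC huA)

-- the survivor fold keeps exactly the maximal sequences
theorem survFold (seqs : List String) : ∀ (L acc : List String),
    (∀ a ∈ acc, a ∈ seqs ∧ pvMax seqs a) →
    (∀ a ∈ acc, a ∉ L) →
    (∀ u ∈ seqs, pvMax seqs u → u ∈ acc ∨ u ∈ L) →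
    L.Nodup → (∀ s ∈ L, s ∈ seqs) →
    L.Pairwise (fun a b => b.toList.length ≤ a.toList.length) →
    acc.Nodup →
    (L.foldl pvSurvStep acc).Nodup ∧
      (∀ x, x ∈ L.foldl pvSurvStep acc ↔ x ∈ acc ∨ (x ∈ L ∧ pvMax seqs x)) := by
  intro L
  induction L with
  | nil =>
    intro acc _ _ _ _ _ _ haccnd
    exact ⟨haccnd, fun x => by simp⟩
  | cons s L ih =>
    intro acc haccS haccL hcover hnd hsub hpair haccnd
    have hsSeqs : s ∈ seqs := hsub s (by simp)
    have hsL : s ∉ L := (List.nodup_cons.mp hnd).1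
    rw [List.foldl_cons]
    by_cases hmax : pvMax seqs s
    · have htest : acc.any (fun t => PySem.Str.isIn s t) = false := by
        rw [List.any_eq_false]
        intro t ht hin
        rw [PySem.Str.isIn_iff_infix] at hin
        have hts : t = s := hmax t (haccS t ht).1 hin
        exact haccL t ht (by rw [hts]; simp)
      have hstep : pvSurvStep acc s = acc ++ [s] := by
        unfold pvSurvStep; rw [htest]; simp
      rw [hstep]
      have hsacc : s ∉ acc := fun hc => haccL s hc (by simp)
      have hres := ih (acc ++ [s])
        (by intro a ha
            rcases List.mem_append.mp ha with h | h
            · exact haccS a h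
            · rw [List.mem_singleton.mp h]; exact ⟨hsSeqs, hmax⟩)
        (by intro a ha hLa
            rcases List.mem_append.mp ha with h | h
            · exact haccL a h (by simp [hLa])
            · rw [List.mem_singleton.mp h] at hLa; exact hsL hLa)
        (by intro u hu humax
            rcases hcover u hu humax with h | h
            · exact Or.inl (List.mem_append.mpr (Or.inl h))
            · rcases List.mem_cons.mp h with rfl | h
              · exact Or.inl (List.mem_append.mpr (Or.inr (by simp)))
              · exact Or.inr h)
        (List.nodup_cons.mp hnd).2
        (fun t ht => hsub t (by simp [ht]))
        (List.pairwise_cons.mp hpair).2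
        (by rw [List.nodup_append]
            refine ⟨haccnd, List.nodup_singleton s, ?_⟩
            intro a ha b hb
            rw [List.mem_singleton] at hb
            subst hb
            exact fun e => hsacc (e ▸ ha))
      refine ⟨hres.1, fun x => ?_⟩
      rw [hres.2 x]
      constructor
      · rintro (hx | ⟨hxL, hxm⟩)
        · rcases List.mem_append.mp hx with h | h
          · exact Or.inl h
          · rw [List.mem_singleton.mp h]; exact Or.inr ⟨by simp, hmax⟩
        · exact Or.inr ⟨by simp [hxL], hxm⟩
      · rintro (hx | ⟨hxL, hxm⟩)
        · exact Or.inl (List.mem_append.mpr (Or.inl hx))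
        · rcases List.mem_cons.mp hxL with rfl | h
          · exact Or.inl (List.mem_append.mpr (Or.inr (by simp)))
          · exact Or.inr ⟨h, hxm⟩
    · obtain ⟨u, huSeqs, humax, hinf⟩ := exists_max_container seqs s hsSeqs
      have hus : u ≠ s := fun e => hmax (e ▸ humax)
      have hlen : s.toList.length < u.toList.length := by
        rcases Nat.lt_or_ge s.toList.length u.toList.length with h | h
        · exact h
        · exact absurd (infix_eq_of_le_length s u hinf h) hus
      have huacc : u ∈ acc := by
        rcases hcover u huSeqs humax with h | h
        · exact h
        · exfalso
          rcases List.mem_cons.mp h with rfl | hL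
          · exact hus rfl
          · have := (List.pairwise_cons.mp hpair).1 u hL
            omega
      have htest : acc.any (fun t => PySem.Str.isIn s t) = true :=
        List.any_eq_true.mpr ⟨u, huacc, (PySem.Str.isIn_iff_infix _ _).mpr hinf⟩
      have hstep : pvSurvStep acc s = acc := by
        unfold pvSurvStep; rw [htest]; simp
      rw [hstep]
      have hres := ih acc haccS
        (fun a ha hLa => haccL a ha (by simp [hLa]))
        (by intro u' hu' humax'
            rcases hcover u' hu' humax' with h | h
            · exact Or.inl h
            · rcases List.mem_cons.mp h with rfl | h
              · exact absurd humax' hmax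
              · exact Or.inr h)
        (List.nodup_cons.mp hnd).2
        (fun t ht => hsub t (by simp [ht]))
        (List.pairwise_cons.mp hpair).2
        haccnd
      refine ⟨hres.1, fun x => ?_⟩
      rw [hres.2 x]
      constructor
      · rintro (hx | ⟨hxL, hxm⟩)
        · exact Or.inl hx
        · exact Or.inr ⟨by simp [hxL], hxm⟩
      · rintro (hx | ⟨hxL, hxm⟩)
        · exact Or.inl hx
        · rcases List.mem_cons.mp hxL with rfl | h
          · exact absurd hxm hmax
          · exact Or.inr ⟨h, hxm⟩

theorem mem_survivors (seqs : List String) :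
    (pvSurvivors seqs).Nodup ∧
      (∀ x, x ∈ pvSurvivors seqs ↔ x ∈ seqs ∧ pvMax seqs x) := by
  have hmem : ∀ x, x ∈ PySem.List.sorted (PySem.List.dedup seqs)
      (fun s => PySem.Str.len s) true ↔ x ∈ seqs := by
    intro x
    rw [(PySem.List.sorted_perm (PySem.List.dedup seqs) (fun s => PySem.Str.len s) true).mem_iff,
      PySem.List.mem_dedup]
  have h := survFold seqs
    (PySem.List.sorted (PySem.List.dedup seqs) (fun s => PySem.Str.len s) true) []
    (by intro a ha; simp at ha)
    (by intro a ha; simp at ha)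
    (by intro u hu _; exact Or.inr ((hmem u).mpr hu))
    ((PySem.List.sorted_perm _ _ _).nodup_iff.mpr (PySem.List.nodup_dedup seqs))
    (fun t ht => (hmem t).mp ht)
    (by
      have := PySem.List.sorted_pairwise_rev (PySem.List.dedup seqs)
        (fun s => PySem.Str.len s)
      refine this.imp ?_
      intro a b hab
      rw [PySem.Str.len_eq, PySem.Str.len_eq] at hab
      exact_mod_cast hab)
    List.nodup_nil
  unfold pvSurvivors
  refine ⟨h.1, fun x => ?_⟩
  rw [h.2 x]
  simp only [List.not_mem_nil, false_or, hmem]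

-- first-occurrence index
theorem index?_self_iff (seqs : List String) (k : Nat) (hk : k < seqs.length) :
    PySem.List.index? seqs seqs[k] = some k ↔ ∀ j, (hj : j < k) → seqs[j] ≠ seqs[k] := by
  constructor
  · intro h
    obtain ⟨_, _, hfirst⟩ := PySem.List.getElem_of_index?_eq_some h
    exact hfirst
  · intro h
    rw [PySem.List.index?_eq_some_iff]
    refine ⟨seqs.take k, seqs.drop (k + 1), ?_, by simp [List.length_take, hk.le], ?_⟩
    · conv_lhs => rw [← List.take_append_drop (k + 1) seqs]
      rw [List.take_add_one, List.getElem?_eq_getElem hk]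
      simp
    · intro hmem
      obtain ⟨j, hj, hje⟩ := List.mem_iff_getElem.mp hmem
      rw [List.length_take] at hj
      have hjk : j < k := lt_of_lt_of_le hj (Nat.min_le_left _ _)
      rw [List.getElem_take] at hje
      exact h j hjk hje

-- A removes index k iff seqs[k] is a later duplicate or is not maximal
theorem not_pvRemB_iff (seqs : List String) (k : Nat) (hk : k < seqs.length) :
    pvRemB seqs k = false ↔
      (∀ j, (hj : j < k) → seqs[j] ≠ seqs[k]) ∧ pvMax seqs seqs[k] := by
  rw [← Bool.not_eq_true, pvRemB_iff]
  constructor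
  · intro h
    constructor
    · intro j hj heq
      exact h ⟨j, by omega, by omega,
        by rw [List.getD_eq_getElem seqs "" hk, List.getD_eq_getElem seqs "" (by omega : j < seqs.length), heq],
        Or.inl hj⟩
    · intro t ht hinf
      obtain ⟨l, hl, hle⟩ := List.mem_iff_getElem.mp ht
      subst hle
      by_contra hne
      have hlk : l ≠ k := fun e => hne (by subst e; rfl)
      exact h ⟨l, hl, hlk,
        by rw [List.getD_eq_getElem seqs "" hk, List.getD_eq_getElem seqs "" hl]; exact hinf,
        Or.inr (by rw [List.getD_eq_getElem seqs "" hk, List.getD_eq_getElem seqs "" hl]; exact hne)⟩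
  · rintro ⟨hfirst, hmax⟩ ⟨l, hl, hne, hinf, hor⟩
    rw [List.getD_eq_getElem seqs "" hk, List.getD_eq_getElem seqs "" hl] at hinf hor
    have heq : seqs[l] = seqs[k] := hmax seqs[l] (seqs.getElem_mem hl) hinf
    rcases hor with hlt | hneq
    · exact hfirst l hlt heq
    · exact hneq heq

-- B's kept index set is exactly the set of indices A keeps
theorem mem_keptIdx (seqs : List String) (m : Int) :
    m ∈ (pvSurvivors seqs).map (pvFirstIdx seqs) ↔
      ∃ k : Nat, k < seqs.length ∧ m = (k : Int) ∧ pvRemB seqs k = false := by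
  have hsurv := mem_survivors seqs
  constructor
  · intro hm
    obtain ⟨s, hsS, rfl⟩ := List.mem_map.mp hm
    obtain ⟨hsSeqs, hmax⟩ := (hsurv.2 s).mp hsS
    have hsome := (PySem.List.index?_isSome_iff seqs s).mpr hsSeqs
    obtain ⟨k, hkv⟩ := Option.isSome_iff_exists.mp hsome
    obtain ⟨hk, hke, hfirst⟩ := PySem.List.getElem_of_index?_eq_some hkv
    refine ⟨k, hk, by unfold pvFirstIdx; rw [hkv]; rfl, ?_⟩
    rw [not_pvRemB_iff seqs k hk]
    refine ⟨?_, ?_⟩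
    · intro j hj
      rw [hke]
      exact hfirst j hj
    · rw [hke]
      exact hmax
  · rintro ⟨k, hk, rfl, hrem⟩
    obtain ⟨hfirst, hmax⟩ := (not_pvRemB_iff seqs k hk).mp hrem
    refine List.mem_map.mpr ⟨seqs[k], (hsurv.2 _).mpr ⟨seqs.getElem_mem hk, hmax⟩, ?_⟩
    unfold pvFirstIdx
    rw [(index?_self_iff seqs k hk).mpr hfirst]
    rfl

theorem mem_removed (seqs : List String) (i : Int) :
    i ∈ pvRemoved seqs ↔ ∃ k : Nat, k < seqs.length ∧ i = (k : Int) ∧ pvRemB seqs k = true := by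
  unfold pvRemoved
  rw [PySem.Set.mem_diff, PySem.Set.mem_ofList, PySem.Set.mem_ofList,
    PySem.List.mem_pyRange_one, PySem.List.len_eq, mem_keptIdx]
  constructor
  · rintro ⟨⟨h0, hn⟩, hnk⟩
    lift i to Nat using h0 with k
    refine ⟨k, by exact_mod_cast hn, rfl, ?_⟩
    cases hR : pvRemB seqs k with
    | true => rfl
    | false => exact absurd ⟨k, by exact_mod_cast hn, rfl, hR⟩ hnk
  · rintro ⟨k, hk, rfl, hR⟩
    refine ⟨⟨by positivity, by exact_mod_cast hk⟩, ?_⟩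
    rintro ⟨k', _, he, hR'⟩
    have : k = k' := by exact_mod_cast he
    rw [this, hR'] at hR
    exact Bool.false_ne_true hR

-- B's enumerate-filter comprehension is an index filter
theorem filter_enumerate_eq_idxFilter {α : Type} :
    ∀ (xs : List α) (s : Int) (P : Int → Bool),
    ((PySem.List.enumerate xs s).filter (fun p => P p.1)).map (·.2) =
      idxFilter xs (fun k => P (s + (k : Int))) := by
  intro xs
  induction xs with
  | nil => intro s P; rfl
  | cons x xs ih =>
    intro s P
    rw [PySem.List.enumerate_cons]
    simp only [List.filter_cons]
    have hcg : idxFilter xs (fun k => P (s + 1 + (k : Int))) =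
        idxFilter xs (fun k => P (s + ((k + 1 : Nat) : Int))) :=
      idxFilter_congr _ _ _ (by intro k _; congr 1; push_cast; ring)
    by_cases hP : P s = true
    · rw [if_pos hP, List.map_cons, ih, hcg]
      simp only [idxFilter, Nat.cast_zero, add_zero]
      rw [if_pos hP]
    · rw [if_neg hP, ih, hcg]
      simp only [idxFilter, Nat.cast_zero, add_zero]
      rw [if_neg hP]

-- ===== VERDICT (by name: the statement is the Claim_ definition above) =====
theorem remove_identical_sub_sequences_spec : Claim_equal_remove_identical_sub_sequences := by
  intro seqs paths _ hPre
  unfold Spec_remove_identical_sub_sequences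
  have hD := pvDn_pairwise seqs
  have hbound : ∀ d ∈ pvDn seqs, d < seqs.length ∧ d < paths.length := by
    intro d hd
    rw [mem_pvDn] at hd
    exact ⟨hd.1, hPre d hd.1 hd.2⟩
  have hA : remove_identical_sub_sequences seqs paths =
      (eraseFold seqs (pvDn seqs), eraseFold paths (pvDn seqs)) := by
    unfold remove_identical_sub_sequences
    rw [sorted_pvAIss, pvADel_eq (pvDn seqs) seqs paths hD hbound]
    rfl
  have hB : remove_identical_sub_sequences_alt seqs paths =
      (((PySem.List.enumerate seqs).filter
          (fun p => !(PySem.Set.contains (pvRemoved seqs) p.1))).map (·.2),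
       ((PySem.List.enumerate paths).filter
          (fun p => !(PySem.Set.contains (pvRemoved seqs) p.1))).map (·.2)) := rfl
  have hpt : ∀ (k : Nat),
      (!(PySem.Set.contains (pvRemoved seqs) ((0 : Int) + (k : Int)))) =
        decide (k ∉ pvDn seqs) := by
    intro k
    have hmem : ((k : Int)) ∈ pvRemoved seqs ↔ k ∈ pvDn seqs := by
      rw [mem_removed, mem_pvDn]
      constructor
      · rintro ⟨k', hk', he, hr⟩
        have : k = k' := by exact_mod_cast he
        subst this
        exact ⟨hk', hr⟩
      · rintro ⟨hk, hr⟩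
        exact ⟨k, hk, rfl, hr⟩
    by_cases h : k ∈ pvDn seqs
    · simp [hmem, h]
    · simp [hmem, h]
  rw [hA, hB]
  rw [eraseFold_eq_idxFilter _ _ hD (fun d hd => (hbound d hd).1),
      eraseFold_eq_idxFilter _ _ hD (fun d hd => (hbound d hd).2)]
  rw [filter_enumerate_eq_idxFilter seqs 0 (fun i => !(PySem.Set.contains (pvRemoved seqs) i)),
      filter_enumerate_eq_idxFilter paths 0 (fun i => !(PySem.Set.contains (pvRemoved seqs) i))]
  refine Prod.ext ?_ ?_
  · exact idxFilter_congr _ _ _ (fun k _ => (hpt k).symm)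
  · exact idxFilter_congr _ _ _ (fun k _ => (hpt k).symm)
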